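-- pv_equiv track=rewrite | github.com/quantumlib/Cirq | cirq-core/cirq/ops/boolean_hamiltonian.py | _simplify_cnots_pairs
-- ===== SOURCE A (Python) =====
-- from typing import cast, Any, Callable, Dict, List, Sequence, Tuple
--
-- def _simplify_cnots_pairs(
--     cnots: List[Tuple[int, int]], flip_control_and_target: bool
-- ) -> List[Tuple[int, int]]:
--     """Simplifies CNOT pairs according to equations 9 and 10 of [4].Simplifies
--
--     CNOT(i, j) @ CNOT(k, j) = CNOT(k, j) @ CNOT(i, j)
--     ───@───────       ───────@───
--        │                     │
--     ───X───X───   =   ───X───X───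
--            │             │
--     ───────@───       ───@───────
--
--     Args:
--         cnots: A list of CNOTS, encoded as integer tuples (control, target).
--         flip_control_and_target: Whether to flip control and target.
--
--     Returns:
--         A Boolean that tells whether a simplification has been performed.
--         The CNOT list, potentially simplified.
--     """
--     x, y = (0, 1) if flip_control_and_target else (1, 0)
--
--     i = 0
--     qubit_to_index: Dict[int, int] = {}
--     for j in range(1, len(cnots)):
--         if cnots[i][x] != cnots[j][x]:
--             # The targets (resp. control) don't match, so we reset the search.
--             i = j
--             qubit_to_index = {cnots[j][y]: j}
--             continue
--
--         if cnots[j][y] in qubit_to_index: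
--             k = qubit_to_index[cnots[j][y]]
--             # The controls (resp. targets) are the same, so we can simplify away.
--             cnots = [cnots[n] for n in range(len(cnots)) if n != j and n != k]
--             return True, cnots
--
--         qubit_to_index[cnots[j][y]] = j
--
--     return False, cnots
-- ===== SOURCE B (Python) =====
-- def _simplify_cnots_pairs(cnots, flip_control_and_target):
--     """Backward-scan re-implementation: for each j, walk k down through the
--     contiguous run of equal cnots[.][x] looking for a matching cnots[k][y].
--     Unlike the dict-based original, this also cancels pairs involving index 0."""
--     x, y = (0, 1) if flip_control_and_target else (1, 0)
--     for j in range(1, len(cnots)):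
--         k = j - 1
--         while k >= 0 and cnots[k][x] == cnots[j][x]:
--             if cnots[k][y] == cnots[j][y]:
--                 return True, cnots[:k] + cnots[k + 1:j] + cnots[j + 1:]
--             k -= 1
--     return False, cnots
-- ===== Notes on version B (the rewrite author's own statement) =====
-- stated objective: alternative
-- what changed: Replaced the forward scan that maintains a dict of the latest index per qubit value (reset at run boundaries) by a per-j backward scan through the contiguous run of equal cnots[.][x]; this also cancels pairs involving index 0, which A misses because its dict is never seeded with index 0.
-- intended difference: On lists whose earliest cancellable pair inside the initial contiguous run of equal cnots[.][x] pairs index 0 with some j (no pair avoiding index 0 at or before j, and excluding lists starting with three equal CNOTs, where both programs cancel a pair with the same resulting list), A never put index 0 into its dict and so returns (False, cnots) or cancels a later pair, while B returns (True, cnots with indices 0 and j removed), the simplification equations 9-10 require. — e.g. on _simplify_cnots_pairs([(1, 2), (1, 2)], false): A returns (false, [(1, 2), (1, 2)]), B returns (true, [])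
import Mathlib
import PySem

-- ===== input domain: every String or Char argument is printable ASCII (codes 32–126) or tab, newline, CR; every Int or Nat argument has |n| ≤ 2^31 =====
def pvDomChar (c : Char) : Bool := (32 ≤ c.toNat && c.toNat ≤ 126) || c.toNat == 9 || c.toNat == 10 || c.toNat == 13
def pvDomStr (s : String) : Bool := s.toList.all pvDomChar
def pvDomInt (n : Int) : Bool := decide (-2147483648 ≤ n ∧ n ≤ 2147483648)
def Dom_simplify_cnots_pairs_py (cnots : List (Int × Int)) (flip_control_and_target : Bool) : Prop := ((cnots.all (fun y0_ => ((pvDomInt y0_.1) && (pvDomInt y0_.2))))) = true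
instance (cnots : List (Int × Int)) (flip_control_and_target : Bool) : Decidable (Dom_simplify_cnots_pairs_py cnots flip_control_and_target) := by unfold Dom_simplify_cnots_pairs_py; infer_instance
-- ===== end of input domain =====

-- B replaces A's dict-of-latest-indices forward scan by a backward scan of the contiguous run,
-- which also cancels pairs involving index 0 that A misses (see D_ below); equal everywhere else.

-- cnots[m][x] for x ∈ {0,1} (Python tuple indexing; indices here are the constants 0/1 from A's first line)
def pvGetXY (p : Int × Int) (i : Nat) : Int := if i = 0 then p.1 else p.2
-- cnots[m][x]; loop indices are Python ints that are provably ≥ 0, represented as Nat (exact here,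
-- every index accessed lies in range, so getD with an arbitrary default is cnots[m])
def pvX (c : List (Int × Int)) (x m : Nat) : Int := pvGetXY (c.getD m (0, 0)) x

-- ===== PORT A =====
-- [cnots[n] for n in range(len(cnots)) if n != j and n != k]
def pvARemove (c : List (Int × Int)) (k j : Nat) : List (Int × Int) :=
  ((List.range c.length).filter (fun m => m ≠ j ∧ m ≠ k)).map (fun m => c.getD m (0, 0))

-- the 'for j in range(1, len(cnots))' loop, state = (i, qubit_to_index)
def pvALoop (c : List (Int × Int)) (x y : Nat) :
    List Nat → Nat → PySem.Dict Int Nat → Bool × List (Int × Int)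
  | [], _, _ => (false, c)
  | j :: js, i, d =>
    if pvX c x i ≠ pvX c x j then
      -- reset the search: i = j; qubit_to_index = {cnots[j][y]: j}
      pvALoop c x y js j (PySem.Dict.empty.insert (pvX c y j) j)
    else
      match d.get? (pvX c y j) with
      | some k => (true, pvARemove c k j)
      | none => pvALoop c x y js i (d.insert (pvX c y j) j)

def simplify_cnots_pairs_py (cnots : List (Int × Int)) (flip_control_and_target : Bool) :
    Bool × (List (Int × Int)) :=
  let xy : Nat × Nat := if flip_control_and_target then (0, 1) else (1, 0)
  pvALoop cnots xy.1 xy.2 (List.range' 1 (cnots.length - 1)) 0 PySem.Dict.empty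

-- ===== PORT B =====
-- cnots[:k] + cnots[k+1:j] + cnots[j+1:]  (slices with nonnegative in-range bounds: exact)
def pvBRemove (c : List (Int × Int)) (k j : Nat) : List (Int × Int) :=
  c.take k ++ (c.take j).drop (k + 1) ++ c.drop (j + 1)

-- the 'while k >= 0 and cnots[k][x] == cnots[j][x]' loop; argument t is k+1 (t = 0 ↔ k = -1)
def pvBScan (c : List (Int × Int)) (x y j : Nat) : Nat → Option (Bool × List (Int × Int))
  | 0 => none
  | t + 1 =>
    if pvX c x t ≠ pvX c x j then none
    else if pvX c y t = pvX c y j then some (true, pvBRemove c t j)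
    else pvBScan c x y j t

def pvBLoop (c : List (Int × Int)) (x y : Nat) : List Nat → Bool × List (Int × Int)
  | [] => (false, c)
  | j :: js =>
    match pvBScan c x y j j with
    | some r => r
    | none => pvBLoop c x y js

def simplify_cnots_pairs_py_alt (cnots : List (Int × Int)) (flip_control_and_target : Bool) :
    Bool × (List (Int × Int)) :=
  let xy : Nat × Nat := if flip_control_and_target then (0, 1) else (1, 0)
  pvBLoop cnots xy.1 xy.2 (List.range' 1 (cnots.length - 1))

-- ===== PRECONDITION & SPEC =====
abbrev pvDAux (c : List (Int × Int)) (x y : Nat) : Prop :=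
  ∃ j, j < c.length ∧ 0 < j ∧ pvX c y 0 = pvX c y j ∧
    (∀ m, m ≤ j → pvX c x m = pvX c x 0) ∧
    ∀ j', j' ≤ j → ∀ k, k < j' → 0 < k → pvX c y k ≠ pvX c y j' 

-- On lists whose earliest cancellable pair inside the initial contiguous run of equal cnots[.][x]
-- pairs index 0 with some j (no pair avoiding index 0 at or before j), A never put index 0 into its
-- dict and returns (False, cnots) or cancels a later pair, while B returns (True, cnots with indices
-- 0 and j removed), the simplification equations 9-10 require.  (Lists starting with three equal
-- CNOTs are not in D_: there A cancels (1,2) instead of (0,1) with the same resulting list.)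
def D_simplify_cnots_pairs_py (cnots : List (Int × Int)) (flip_control_and_target : Bool) : Prop :=
  pvDAux cnots (if flip_control_and_target then 0 else 1) (if flip_control_and_target then 1 else 0)
    ∧ cnots.take 3 ≠ List.replicate 3 (cnots.getD 0 (0, 0))
instance (cnots : List (Int × Int)) (flip_control_and_target : Bool) :
    Decidable (D_simplify_cnots_pairs_py cnots flip_control_and_target) := by
  unfold D_simplify_cnots_pairs_py; infer_instance

def Spec_simplify_cnots_pairs_py (cnots : List (Int × Int)) (flip_control_and_target : Bool) (out : Bool × (List (Int × Int))) : Prop := ¬ D_simplify_cnots_pairs_py cnots flip_control_and_target → out = simplify_cnots_pairs_py_alt cnots flip_control_and_target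
instance (cnots : List (Int × Int)) (flip_control_and_target : Bool) (out : Bool × (List (Int × Int))) : Decidable (Spec_simplify_cnots_pairs_py cnots flip_control_and_target out) := by unfold Spec_simplify_cnots_pairs_py; infer_instance

def pvDiffWitness_simplify_cnots_pairs_py : (List (Int × Int)) × Bool := ([(1, 2), (1, 2)], false)
def pvDiffWitnessOut_simplify_cnots_pairs_py : (Bool × (List (Int × Int))) × (Bool × (List (Int × Int))) :=
  ((false, [(1, 2), (1, 2)]), (true, []))

-- ===== CLAIM (what is proved, stated in full; the proofs are below) =====
def Claim_unchanged_simplify_cnots_pairs_py : Prop := ∀ (cnots : List (Int × Int)) (flip_control_and_target : Bool), Dom_simplify_cnots_pairs_py cnots flip_control_and_target → Spec_simplify_cnots_pairs_py cnots flip_control_and_target (simplify_cnots_pairs_py cnots flip_control_and_target)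
def Claim_exact_simplify_cnots_pairs_py : Prop := ∀ (cnots : List (Int × Int)) (flip_control_and_target : Bool), Dom_simplify_cnots_pairs_py cnots flip_control_and_target → D_simplify_cnots_pairs_py cnots flip_control_and_target → simplify_cnots_pairs_py cnots flip_control_and_target ≠ simplify_cnots_pairs_py_alt cnots flip_control_and_target
def Claim_changed_simplify_cnots_pairs_py : Prop := Dom_simplify_cnots_pairs_py (pvDiffWitness_simplify_cnots_pairs_py.1) (pvDiffWitness_simplify_cnots_pairs_py.2) ∧ D_simplify_cnots_pairs_py (pvDiffWitness_simplify_cnots_pairs_py.1) (pvDiffWitness_simplify_cnots_pairs_py.2) ∧ simplify_cnots_pairs_py (pvDiffWitness_simplify_cnots_pairs_py.1) (pvDiffWitness_simplify_cnots_pairs_py.2) = pvDiffWitnessOut_simplify_cnots_pairs_py.1 ∧ simplify_cnots_pairs_py_alt (pvDiffWitness_simplify_cnots_pairs_py.1) (pvDiffWitness_simplify_cnots_pairs_py.2) = pvDiffWitnessOut_simplify_cnots_pairs_py.2 ∧ pvDiffWitnessOut_simplify_cnots_pairs_py.1 ≠ pvDiffWitnessOut_simplify_cnots_pairs_py.2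

-- ===== LEMMAS AND PROOFS =====

-- the two rebuilt lists coincide
theorem pvMapRange (c : List (Int × Int)) :
    ∀ (l a : Nat), a + l ≤ c.length →
      (List.range' a l).map (fun m => c.getD m (0, 0)) = (c.drop a).take l := by
  intro l
  induction l with
  | zero => intro a _; simp
  | succ n ih =>
    intro a h
    rw [List.range'_succ, List.map_cons, List.drop_eq_getElem_cons (show a < c.length by omega)]
    rw [List.take_succ_cons, ih (a + 1) (by omega), List.getD_eq_getElem c (0,0) (show a < c.length by omega)]

-- 'k and j are a cancellable pair': same x-coordinate on the whole contiguous block [k, j], same y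
abbrev pvGd (c : List (Int × Int)) (x y k j : Nat) : Prop :=
  k < j ∧ j < c.length ∧ pvX c y k = pvX c y j ∧ ∀ m, m ≤ j → k ≤ m → pvX c x m = pvX c x j

theorem pvRangeSplit (a b d : Nat) :
    List.range' a b ++ List.range' (a + b) d = List.range' a (b + d) := by
  induction b generalizing a with
  | zero => simp
  | succ n ih =>
    rw [List.range'_succ, show n + 1 + d = (n + d) + 1 by omega, List.range'_succ, List.cons_append]
    rw [show a + (n + 1) = (a + 1) + n by omega, ih (a + 1)]

theorem pvRemove_eq (c : List (Int × Int)) (k j : Nat) (hkj : k < j) (hj : j < c.length) :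
    pvARemove c k j = pvBRemove c k j := by
  unfold pvARemove pvBRemove
  have hsplit : List.range c.length =
      List.range' 0 k ++ [k] ++ List.range' (k+1) (j-k-1) ++ [j] ++ List.range' (j+1) (c.length-j-1) := by
    rw [List.range_eq_range']
    have h1 : ([k] : List Nat) = List.range' k 1 := by simp
    have h2 : ([j] : List Nat) = List.range' j 1 := by simp
    rw [h1, h2]
    rw [show List.range' 0 k ++ List.range' k 1 ++ List.range' (k+1) (j-k-1) ++ List.range' j 1 ++ List.range' (j+1) (c.length-j-1)
        = List.range' 0 k ++ (List.range' k 1 ++ (List.range' (k+1) (j-k-1) ++ (List.range' j 1 ++ List.range' (j+1) (c.length-j-1)))) by simp [List.append_assoc]]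
    rw [show List.range' j 1 ++ List.range' (j+1) (c.length-j-1) = List.range' j (c.length - j) by
          have := pvRangeSplit j 1 (c.length-j-1)
          rw [this]; congr 1; omega]
    rw [show List.range' (k+1) (j-k-1) ++ List.range' j (c.length-j) = List.range' (k+1) (c.length-k-1) by
          have := pvRangeSplit (k+1) (j-k-1) (c.length-j)
          rw [show k + 1 + (j - k - 1) = j by omega] at this
          rw [this]; congr 1; omega]
    rw [show List.range' k 1 ++ List.range' (k+1) (c.length-k-1) = List.range' k (c.length - k) by
          have := pvRangeSplit k 1 (c.length-k-1)
          rw [this]; congr 1; omega]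
    rw [show List.range' 0 k ++ List.range' k (c.length-k) = List.range' 0 c.length by
          have := pvRangeSplit 0 k (c.length-k)
          simp only [Nat.zero_add] at this
          rw [this]; congr 1; omega]
  rw [hsplit]
  simp only [List.filter_append, List.map_append]
  have hf1 : (List.range' 0 k).filter (fun m => decide (m ≠ j ∧ m ≠ k)) = List.range' 0 k := by
    apply List.filter_eq_self.mpr
    intro m hm
    have := List.mem_range'_1.mp hm
    simp only [decide_eq_true_eq]; omega
  have hf2 : (List.range' (k+1) (j-k-1)).filter (fun m => decide (m ≠ j ∧ m ≠ k)) = List.range' (k+1) (j-k-1) := by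
    apply List.filter_eq_self.mpr
    intro m hm
    have := List.mem_range'_1.mp hm
    simp only [decide_eq_true_eq]; omega
  have hf3 : (List.range' (j+1) (c.length-j-1)).filter (fun m => decide (m ≠ j ∧ m ≠ k)) = List.range' (j+1) (c.length-j-1) := by
    apply List.filter_eq_self.mpr
    intro m hm
    have := List.mem_range'_1.mp hm
    simp only [decide_eq_true_eq]; omega
  have hfk : ([k] : List Nat).filter (fun m => decide (m ≠ j ∧ m ≠ k)) = [] := by simp
  have hfj : ([j] : List Nat).filter (fun m => decide (m ≠ j ∧ m ≠ k)) = [] := by simp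
  rw [hf1, hf2, hf3, hfk, hfj]
  simp only [List.map_nil, List.append_nil]
  rw [pvMapRange c k 0 (by omega), pvMapRange c (j-k-1) (k+1) (by omega),
      pvMapRange c (c.length-j-1) (j+1) (by omega)]
  rw [List.drop_zero, List.drop_take, List.take_of_length_le (l := c.drop (j+1)) (by simp; omega)]
  simp [Nat.sub_sub]

-- B: the while loop finds the largest cancellable k below its start
theorem pvBScan_some (c : List (Int × Int)) (x y k j : Nat) (hg : pvGd c x y k j)
    (hmax : ∀ k', k < k' → ¬ pvGd c x y k' j) :
    ∀ t, k < t → t ≤ j → pvBScan c x y j t = some (true, pvBRemove c k j) := by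
  intro t
  induction t with
  | zero => omega
  | succ u ih =>
    intro h1 h2
    obtain ⟨hkj, hjn, hy, hx⟩ := hg
    by_cases hku : k = u
    · subst hku
      simp only [pvBScan]
      rw [if_neg (by simp only [ne_eq, not_not]; exact hx k (by omega) (le_refl k)), if_pos hy]
    · have hku' : k < u := by omega
      have hxu : pvX c x u = pvX c x j := hx u (by omega) (by omega)
      have hyu : pvX c y u ≠ pvX c y j := by
        intro heq
        exact hmax u hku' ⟨by omega, hjn, heq, fun m hmj hum => hx m hmj (by omega)⟩
      simp only [pvBScan]
      rw [if_neg (by simp only [ne_eq, not_not]; exact hxu), if_neg hyu]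
      exact ih (by omega) (by omega)

-- B: the while loop finds nothing if j has no cancellable partner
theorem pvBScan_none (c : List (Int × Int)) (x y j : Nat) (hj : j < c.length)
    (hng : ∀ k, ¬ pvGd c x y k j) :
    ∀ t, t ≤ j → (∀ m, t ≤ m → m < j → pvX c x m = pvX c x j) →
      pvBScan c x y j t = none := by
  intro t
  induction t with
  | zero => intro _ _; simp [pvBScan]
  | succ u ih =>
    intro h1 hconst
    by_cases hxu : pvX c x u = pvX c x j
    · have hyu : pvX c y u ≠ pvX c y j := by
        intro heq
        refine hng u ⟨by omega, hj, heq, fun m hmj hum => ?_⟩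
        rcases Nat.eq_or_lt_of_le hum with h | h
        · exact h ▸ hxu
        · rcases Nat.eq_or_lt_of_le hmj with h' | h'
          · simp [h']
          · exact hconst m (by omega) h'
      simp only [pvBScan]
      rw [if_neg (by simp only [ne_eq, not_not]; exact hxu), if_neg hyu]
      refine ih (by omega) (fun m hm hm2 => ?_)
      rcases Nat.eq_or_lt_of_le hm with h | h
      · exact h ▸ hxu
      · exact hconst m (by omega) hm2
    · simp only [pvBScan]
      rw [if_pos hxu]

theorem pvBLoop_none (c : List (Int × Int)) (x y : Nat)
    (hng : ∀ j k, ¬ pvGd c x y k j) :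
    ∀ l s, s + l ≤ c.length → pvBLoop c x y (List.range' s l) = (false, c) := by
  intro l
  induction l with
  | zero => intro s _; simp [pvBLoop]
  | succ n ih =>
    intro s h
    rw [List.range'_succ]
    simp only [pvBLoop]
    rw [pvBScan_none c x y s (by omega) (hng s) s (le_refl s) (fun m h1 h2 => by omega)]
    exact ih (s + 1) (by omega)

theorem pvBLoop_some (c : List (Int × Int)) (x y K J : Nat) (hg : pvGd c x y K J)
    (hmax : ∀ k, K < k → ¬ pvGd c x y k J)
    (hmin : ∀ j' k, j' < J → ¬ pvGd c x y k j') :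
    ∀ l s, s ≤ J → J < s + l → pvBLoop c x y (List.range' s l) = (true, pvBRemove c K J) := by
  intro l
  induction l with
  | zero => intro s h1 h2; omega
  | succ n ih =>
    intro s h1 h2
    rw [List.range'_succ]
    simp only [pvBLoop]
    by_cases hsJ : s = J
    · subst hsJ
      rw [pvBScan_some c x y K s hg hmax s hg.1 (le_refl s)]
    · rw [pvBScan_none c x y s (by have := hg.2.1; omega) (fun k => hmin s k (by omega)) s
          (le_refl s) (fun m hm hm2 => by omega)]
      exact ih (s + 1) (by omega) (by omega)

-- A: the dictionary invariant — d maps v to the latest index k in [max i 1, s) with cnots[k][y] = v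
def pvDictInv (c : List (Int × Int)) (y s i : Nat) (d : PySem.Dict Int Nat) : Prop :=
  ∀ v k, d.get? v = some k ↔
    (max i 1 ≤ k ∧ k < s ∧ pvX c y k = v ∧ ∀ m, k < m → m < s → pvX c y m ≠ v)

theorem pvALoop_none (c : List (Int × Int)) (x y : Nat)
    (hng : ∀ j k, ¬ (1 ≤ k ∧ pvGd c x y k j)) :
    ∀ l s i d, s + l = c.length → i < s →
      (∀ m, i ≤ m → m < s → pvX c x m = pvX c x i) →
      (i = 0 ∨ pvX c x (i - 1) ≠ pvX c x i) →
      pvDictInv c y s i d →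
      pvALoop c x y (List.range' s l) i d = (false, c) := by
  intro l
  induction l with
  | zero => intro s i d _ _ _ _ _; simp [pvALoop]
  | succ n ih =>
    intro s i d hlen hi hrun hstart hdict
    have hs1 : 1 ≤ s := by omega
    have hsn : s < c.length := by omega
    rw [List.range'_succ]
    simp only [pvALoop]
    by_cases hx : pvX c x i = pvX c x s
    · rw [if_neg (by simp only [ne_eq, not_not]; exact hx)]
      have hnone : d.get? (pvX c y s) = none := by
        cases hlk : d.get? (pvX c y s) with
        | none => rfl
        | some k =>
          exfalso
          obtain ⟨hk1, hks, hky, _⟩ := (hdict _ k).mp hlk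
          have hik : i ≤ k := le_trans (le_max_left i 1) hk1
          have h1k : 1 ≤ k := le_trans (le_max_right i 1) hk1
          refine hng s k ⟨h1k, hks, hsn, hky, fun m hms hkm => ?_⟩
          rcases Nat.eq_or_lt_of_le hms with h | h
          · rw [h]
          · calc pvX c x m = pvX c x i := hrun m (by omega) h
              _ = pvX c x s := hx
      rw [hnone]
      show pvALoop c x y (List.range' (s+1) n) i (d.insert (pvX c y s) s) = (false, c)
      refine ih (s+1) i _ (by omega) (by omega) (fun m h1 h2 => ?_) hstart (fun v k => ?_)
      · rcases Nat.lt_succ_iff_lt_or_eq.mp h2 with h | h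
        · exact hrun m h1 h
        · rw [h]; exact hx.symm
      · rw [PySem.Dict.get?_insert]
        by_cases hv : v = pvX c y s
        · rw [if_pos hv]
          constructor
          · intro hk
            have hks : s = k := by injection hk
            refine ⟨by omega, by omega, by rw [← hks]; exact hv.symm, fun m h1 h2 => by omega⟩
          · rintro ⟨h1, h2, h3, h4⟩
            have hkne : k = s := by
              by_contra hne
              exact (h4 s (by omega) (Nat.lt_succ_self s)) hv.symm
            rw [hkne]
        · rw [if_neg hv, hdict v k]
          constructor
          · rintro ⟨h1, h2, h3, h4⟩
            refine ⟨h1, by omega, h3, fun m hm1 hm2 => ?_⟩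
            rcases Nat.lt_succ_iff_lt_or_eq.mp hm2 with h | h
            · exact h4 m hm1 h
            · rw [h]; exact fun heq => hv heq.symm
          · rintro ⟨h1, h2, h3, h4⟩
            have hkne : k ≠ s := fun h => hv (by rw [← h3, h])
            exact ⟨h1, by omega, h3, fun m hm1 hm2 => h4 m hm1 (by omega)⟩
    · rw [if_pos (by simpa using hx)]
      refine ih (s+1) s _ (by omega) (by omega) (fun m h1 h2 => by
          have : m = s := by omega
          rw [this]) (Or.inr ?_) (fun v k => ?_)
      · have heq : pvX c x (s-1) = pvX c x i := hrun (s-1) (by omega) (by omega)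
        rw [heq]; exact hx
      · rw [PySem.Dict.get?_insert]
        by_cases hv : v = pvX c y s
        · rw [if_pos hv]
          constructor
          · intro hk
            have hks : s = k := by injection hk
            refine ⟨by omega, by omega, by rw [← hks]; exact hv.symm, fun m h1 h2 => by omega⟩
          · rintro ⟨h1, h2, h3, h4⟩
            have : k = s := by omega
            rw [this]
        · rw [if_neg hv, PySem.Dict.get?_empty]
          constructor
          · intro h; cases h
          · rintro ⟨h1, h2, h3, h4⟩
            have : k = s := by omega
            exact absurd h3 (by rw [this]; exact fun hh => hv hh.symm)

theorem pvALoop_some (c : List (Int × Int)) (x y K J : Nat) (hg : pvGd c x y K J) (hK1 : 1 ≤ K)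
    (hmax : ∀ k, K < k → ¬ pvGd c x y k J)
    (hmin : ∀ j' k, j' < J → ¬ (1 ≤ k ∧ pvGd c x y k j')) :
    ∀ l s i d, s + l = c.length → i < s → s ≤ J →
      (∀ m, i ≤ m → m < s → pvX c x m = pvX c x i) →
      (i = 0 ∨ pvX c x (i - 1) ≠ pvX c x i) →
      pvDictInv c y s i d →
      pvALoop c x y (List.range' s l) i d = (true, pvARemove c K J) := by
  intro l
  induction l with
  | zero =>
    intro s i d hlen _ hsJ _ _ _
    have := hg.2.1
    omega
  | succ n ih =>
    intro s i d hlen hi hsJ hrun hstart hdict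
    have hs1 : 1 ≤ s := by omega
    have hsn : s < c.length := by omega
    rw [List.range'_succ]
    simp only [pvALoop]
    by_cases hsJ' : s = J
    · subst hsJ'
      obtain ⟨hKJ, hJn, hKy, hKx⟩ := hg
      have hXis : pvX c x i = pvX c x s := by
        by_cases hiK : i ≤ K
        · calc pvX c x i = pvX c x K := (hrun K hiK (by omega)).symm
            _ = pvX c x s := hKx K (by omega) (le_refl K)
        · exact hKx i (by omega) (by omega)
      rw [if_neg (by simp only [ne_eq, not_not]; exact hXis)]
      have hget : d.get? (pvX c y s) = some K := by
        refine (hdict _ K).mpr ⟨?_, hKJ, hKy, fun m h1 h2 heq => ?_⟩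
        · have hiK : i ≤ K := by
            by_contra hKi
            have hi1 : 1 ≤ i := by omega
            rcases hstart with h0 | hne
            · omega
            · refine hne ?_
              calc pvX c x (i-1) = pvX c x s := hKx (i-1) (by omega) (by omega)
                _ = pvX c x i := hXis.symm
          omega
        · exact hmax m h1 ⟨h2, hJn, heq, fun m' hm' hmm' => hKx m' hm' (by omega)⟩
      rw [hget]
    · have hsJ2 : s < J := by omega
      by_cases hx : pvX c x i = pvX c x s
      · rw [if_neg (by simp only [ne_eq, not_not]; exact hx)]
        have hnone : d.get? (pvX c y s) = none := by
          cases hlk : d.get? (pvX c y s) with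
          | none => rfl
          | some k =>
            exfalso
            obtain ⟨hk1, hks, hky, _⟩ := (hdict _ k).mp hlk
            have hik : i ≤ k := le_trans (le_max_left i 1) hk1
            have h1k : 1 ≤ k := le_trans (le_max_right i 1) hk1
            refine hmin s k hsJ2 ⟨h1k, hks, hsn, hky, fun m hms hkm => ?_⟩
            rcases Nat.eq_or_lt_of_le hms with h | h
            · rw [h]
            · calc pvX c x m = pvX c x i := hrun m (by omega) h
                _ = pvX c x s := hx
        rw [hnone]
        show pvALoop c x y (List.range' (s+1) n) i (d.insert (pvX c y s) s) = (true, pvARemove c K J)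
        refine ih (s+1) i _ (by omega) (by omega) (by omega) (fun m h1 h2 => ?_) hstart (fun v k => ?_)
        · rcases Nat.lt_succ_iff_lt_or_eq.mp h2 with h | h
          · exact hrun m h1 h
          · rw [h]; exact hx.symm
        · rw [PySem.Dict.get?_insert]
          by_cases hv : v = pvX c y s
          · rw [if_pos hv]
            constructor
            · intro hk
              have hks : s = k := by injection hk
              refine ⟨by omega, by omega, by rw [← hks]; exact hv.symm, fun m h1 h2 => by omega⟩
            · rintro ⟨h1, h2, h3, h4⟩
              have hkne : k = s := by
                by_contra hne
                exact (h4 s (by omega) (Nat.lt_succ_self s)) hv.symm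
              rw [hkne]
          · rw [if_neg hv, hdict v k]
            constructor
            · rintro ⟨h1, h2, h3, h4⟩
              refine ⟨h1, by omega, h3, fun m hm1 hm2 => ?_⟩
              rcases Nat.lt_succ_iff_lt_or_eq.mp hm2 with h | h
              · exact h4 m hm1 h
              · rw [h]; exact fun heq => hv heq.symm
            · rintro ⟨h1, h2, h3, h4⟩
              have hkne : k ≠ s := fun h => hv (by rw [← h3, h])
              exact ⟨h1, by omega, h3, fun m hm1 hm2 => h4 m hm1 (by omega)⟩
      · rw [if_pos (by simpa using hx)]
        refine ih (s+1) s _ (by omega) (by omega) (by omega) (fun m h1 h2 => by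
            have : m = s := by omega
            rw [this]) (Or.inr ?_) (fun v k => ?_)
        · have heq : pvX c x (s-1) = pvX c x i := hrun (s-1) (by omega) (by omega)
          rw [heq]; exact hx
        · rw [PySem.Dict.get?_insert]
          by_cases hv : v = pvX c y s
          · rw [if_pos hv]
            constructor
            · intro hk
              have hks : s = k := by injection hk
              refine ⟨by omega, by omega, by rw [← hks]; exact hv.symm, fun m h1 h2 => by omega⟩
            · rintro ⟨h1, h2, h3, h4⟩
              have : k = s := by omega
              rw [this]
          · rw [if_neg hv, PySem.Dict.get?_empty]
            constructor
            · intro h; cases h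
            · rintro ⟨h1, h2, h3, h4⟩
              have : k = s := by omega
              exact absurd h3 (by rw [this]; exact fun hh => hv hh.symm)

theorem pvDictInv_init (c : List (Int × Int)) (y : Nat) :
    pvDictInv c y 1 0 PySem.Dict.empty := by
  intro v k
  rw [PySem.Dict.get?_empty]
  constructor
  · intro h; cases h
  · rintro ⟨h1, h2, _, _⟩; omega

-- the two loops agree whenever the difference region pvDAux does not apply
theorem pvMain (c : List (Int × Int)) (x y : Nat) (hnD : ¬ pvDAux c x y) :
    pvALoop c x y (List.range' 1 (c.length - 1)) 0 PySem.Dict.empty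
      = pvBLoop c x y (List.range' 1 (c.length - 1)) := by
  have hdict0 : pvDictInv c y 1 0 PySem.Dict.empty := pvDictInv_init c y
  by_cases hP : ∃ j, ∃ k, k < j ∧ pvGd c x y k j
  · haveI : DecidablePred fun j => ∃ k, k < j ∧ pvGd c x y k j := fun _ => Classical.dec _
    haveI : DecidablePred fun k => pvGd c x y k (Nat.find hP) := fun _ => Classical.dec _
    set J := Nat.find hP with hJdef
    obtain ⟨k0, hk0, hg0⟩ := Nat.find_spec hP
    have hmin' : ∀ j' k, j' < J → ¬ pvGd c x y k j' := fun j' k h hg =>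
      Nat.find_min hP h ⟨k, hg.1, hg⟩
    set K := Nat.findGreatest (fun k => pvGd c x y k J) J with hKdef
    have hK : pvGd c x y K J := Nat.findGreatest_spec (P := fun k => pvGd c x y k J) (le_of_lt hk0) hg0
    have hmaxK : ∀ k, K < k → ¬ pvGd c x y k J := fun k hKk hg =>
      Nat.findGreatest_is_greatest (P := fun k => pvGd c x y k J) hKk (le_of_lt hg.1) hg
    have hn1 : 1 + (c.length - 1) = c.length := by have := hK.2.1; omega
    by_cases hK1 : 1 ≤ K
    · rw [pvALoop_some c x y K J hK hK1 hmaxK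
          (fun j' k h hgk => hmin' j' k h hgk.2)
          (c.length - 1) 1 0 PySem.Dict.empty hn1 (by omega) (by omega)
          (fun m h1 h2 => by have hm0 : m = 0 := (by omega); subst hm0; rfl) (Or.inl rfl) hdict0]
      rw [pvBLoop_some c x y K J hK hmaxK hmin' (c.length - 1) 1 (by omega)
          (by have := hK.2.1; omega)]
      rw [pvRemove_eq c K J hK.1 hK.2.1]
    · exfalso
      have hK0 : K = 0 := by omega
      rw [hK0] at hK
      obtain ⟨h0J, hJn, hY, hX⟩ := hK
      refine hnD ⟨J, hJn, h0J, hY, fun m hm => ?_, fun j' hj' k hk hk0 heq => ?_⟩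
      · calc pvX c x m = pvX c x J := hX m hm (by omega)
          _ = pvX c x 0 := (hX 0 (by omega) (by omega)).symm
      · have hgd : pvGd c x y k j' := ⟨hk, by omega, heq, fun m' hm' hkm' => by
            calc pvX c x m' = pvX c x J := hX m' (by omega) (by omega)
              _ = pvX c x j' := (hX j' (by omega) (by omega)).symm⟩
        rcases Nat.eq_or_lt_of_le hj' with h | h
        · exact hmaxK k (by omega) (h ▸ hgd)
        · exact hmin' j' k h hgd
  · have hng : ∀ j k, ¬ pvGd c x y k j := fun j k hg => hP ⟨j, k, hg.1, hg⟩
    by_cases hc : c.length = 0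
    · rw [hc]
      simp [pvALoop, pvBLoop]
    · rw [pvALoop_none c x y (fun j k h => hng j k h.2) (c.length - 1) 1 0 PySem.Dict.empty
            (by omega) (by omega) (fun m h1 h2 => by have hm0 : m = 0 := (by omega); subst hm0; rfl) (Or.inl rfl) hdict0]
      rw [pvBLoop_none c x y hng (c.length - 1) 1 (by omega)]

-- on lists starting with three equal CNOTs the two loops also agree: A cancels (1,2), B cancels (0,1)
theorem pvMainT (c : List (Int × Int)) (x y : Nat)
    (hT : c.take 3 = List.replicate 3 (c.getD 0 (0, 0))) :
    pvALoop c x y (List.range' 1 (c.length - 1)) 0 PySem.Dict.empty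
      = pvBLoop c x y (List.range' 1 (c.length - 1)) := by
  match c, hT with
  | [], hT => simp at hT
  | [a], hT => simp [List.replicate] at hT
  | [a, b], hT => simp [List.replicate] at hT
  | a :: b :: d :: t, hT =>
    obtain ⟨hb, hd⟩ : b = a ∧ d = a := by
      simp [List.replicate, List.take] at hT
      exact ⟨hT.1, hT.2⟩
    rw [hb, hd]
    have hg2 : pvGd (a :: a :: a :: t) x y 1 2 := by
      refine ⟨by omega, by simp, rfl, fun m h1 h2 => ?_⟩
      interval_cases m <;> rfl
    have hg1 : pvGd (a :: a :: a :: t) x y 0 1 := by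
      refine ⟨by omega, by simp, rfl, fun m h1 h2 => ?_⟩
      interval_cases m <;> rfl
    rw [pvALoop_some (a :: a :: a :: t) x y 1 2 hg2 (le_refl 1)
          (fun k hk hg => by have := hg.1; omega)
          (fun j' k hj' h => by have := h.2.1; omega)
          ((a :: a :: a :: t).length - 1) 1 0 PySem.Dict.empty
          (by simp only [List.length_cons]; omega) (by omega) (by omega)
          (fun m h1 h2 => by have hm0 : m = 0 := (by omega); subst hm0; rfl)
          (Or.inl rfl) (pvDictInv_init _ y)]
    rw [pvBLoop_some (a :: a :: a :: t) x y 0 1 hg1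
          (fun k hk hg => by have := hg.1; omega)
          (fun j' k hj' hg => by have := hg.1; omega)
          ((a :: a :: a :: t).length - 1) 1 (le_refl 1) (by simp only [List.length_cons]; omega)]
    rw [pvRemove_eq (a :: a :: a :: t) 1 2 (by omega) (by simp only [List.length_cons]; omega)]
    rfl

-- both coordinates of two entries equal make the entries equal (x, y are the two tuple positions)
theorem pvPairEq (x y : Nat) (hxy : (x = 0 ∧ y = 1) ∨ (x = 1 ∧ y = 0)) (p q : Int × Int)
    (hx : pvGetXY p x = pvGetXY q x) (hy : pvGetXY p y = pvGetXY q y) : p = q := by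
  rcases hxy with ⟨h1, h2⟩ | ⟨h1, h2⟩ <;> subst h1 h2 <;>
    simp [pvGetXY] at hx hy <;> exact Prod.ext_iff.mpr ⟨by assumption, by assumption⟩

-- inside the difference region the two programs really differ
theorem pvTight (c : List (Int × Int)) (x y : Nat)
    (hxy : (x = 0 ∧ y = 1) ∨ (x = 1 ∧ y = 0))
    (hDA : pvDAux c x y)
    (hT : ¬ c.take 3 = List.replicate 3 (c.getD 0 (0, 0))) :
    pvALoop c x y (List.range' 1 (c.length - 1)) 0 PySem.Dict.empty
      ≠ pvBLoop c x y (List.range' 1 (c.length - 1)) := by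
  obtain ⟨j, hjn, hj0, hY, hXc, hNo⟩ := hDA
  -- B fires exactly at j with partner 0
  have hgB : pvGd c x y 0 j :=
    ⟨hj0, hjn, hY, fun m hm _ => (hXc m hm).trans (hXc j (le_refl j)).symm⟩
  have hmaxB : ∀ k, 0 < k → ¬ pvGd c x y k j := fun k hk hg =>
    hNo j (le_refl j) k hg.1 hk hg.2.2.1
  have hminB : ∀ j' k, j' < j → ¬ pvGd c x y k j' := by
    intro j' k hj' hg
    rcases Nat.eq_zero_or_pos k with hk0 | hk1
    · subst hk0
      exact hNo j (le_refl j) j' hj' hg.1 (hg.2.2.1.symm.trans hY)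
    · exact hNo j' (by omega) k hg.1 hk1 hg.2.2.1
  have hB : pvBLoop c x y (List.range' 1 (c.length - 1)) = (true, pvBRemove c 0 j) :=
    pvBLoop_some c x y 0 j hgB hmaxB hminB (c.length - 1) 1 (by omega) (by omega)
  rw [hB]
  by_cases hP : ∃ j', ∃ k, k < j' ∧ 1 ≤ k ∧ pvGd c x y k j'
  · -- A fires at its own first pair (K, J) with K ≥ 1 and J > j
    haveI : DecidablePred fun j' => ∃ k, k < j' ∧ 1 ≤ k ∧ pvGd c x y k j' := fun _ => Classical.dec _
    set J := Nat.find hP with hJdef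
    haveI : DecidablePred fun k => pvGd c x y k J := fun _ => Classical.dec _
    obtain ⟨k0, hk0lt, hk01, hg0⟩ := Nat.find_spec hP
    set K := Nat.findGreatest (fun k => pvGd c x y k J) J with hKdef
    have hK : pvGd c x y K J :=
      Nat.findGreatest_spec (P := fun k => pvGd c x y k J) (le_of_lt hk0lt) hg0
    have hK1 : 1 ≤ K := by
      by_contra hc
      exact Nat.findGreatest_is_greatest (P := fun k => pvGd c x y k J) (n := J)
        (show K < k0 by omega) (le_of_lt hk0lt) hg0
    have hmaxK : ∀ k, K < k → ¬ pvGd c x y k J := fun k hKk hg =>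
      Nat.findGreatest_is_greatest (P := fun k => pvGd c x y k J) hKk (le_of_lt hg.1) hg
    have hminA : ∀ j' k, j' < J → ¬ (1 ≤ k ∧ pvGd c x y k j') := fun j' k h hg =>
      Nat.find_min hP h ⟨k, hg.2.1, hg.1, hg.2⟩
    have hjJ : j < J := by
      rcases Nat.lt_or_ge j J with h | h
      · exact h
      · exact absurd (hNo J h K hK.1 hK1 hK.2.2.1) (by simp)
    have hJn : J < c.length := hK.2.1
    have hA : pvALoop c x y (List.range' 1 (c.length - 1)) 0 PySem.Dict.empty
        = (true, pvARemove c K J) :=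
      pvALoop_some c x y K J hK hK1 hmaxK hminA (c.length - 1) 1 0 PySem.Dict.empty
        (by omega) (by omega) (by omega)
        (fun m h1 h2 => by have hm0 : m = 0 := (by omega); subst hm0; rfl)
        (Or.inl rfl) (pvDictInv_init c y)
    rw [hA, pvRemove_eq c K J hK.1 hK.2.1]
    intro heq
    have hlists : pvBRemove c K J = pvBRemove c 0 j := congrArg Prod.snd heq
    have h0 : (pvBRemove c K J)[0]? = some (c.getD 0 (0, 0)) := by
      unfold pvBRemove
      rw [List.getElem?_append_left (by simp [List.length_take]; omega)]
      rw [List.getElem?_append_left (by simp [List.length_take]; omega)]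
      rw [List.getElem?_take_of_lt (by omega), List.getElem?_eq_getElem (by omega)]
      rw [List.getD_eq_getElem c (0,0) (by omega)]
    rcases Nat.lt_or_ge j 2 with hj1 | hj2
    · -- j = 1 : B's list starts with c[2]; equality would force three equal leading CNOTs
      have hj1' : j = 1 := by omega
      subst hj1'
      have hn3 : 3 ≤ c.length := by omega
      have hdrop : (c.take 1).drop 1 = [] := by
        rw [List.drop_eq_nil_iff]; simp
      have h1 : (pvBRemove c 0 1)[0]? = some (c.getD 2 (0, 0)) := by
        unfold pvBRemove
        rw [List.take_zero, List.nil_append, hdrop, List.nil_append]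
        rw [List.getElem?_drop, List.getElem?_eq_getElem (by omega)]
        rw [List.getD_eq_getElem c (0,0) (by omega)]
      have h02 : c.getD 0 (0, 0) = c.getD 2 (0, 0) := by
        have h' : some (c.getD 0 (0, 0)) = some (c.getD 2 (0, 0)) := by
          rw [← h0, ← h1, hlists]
        exact Option.some_inj.mp h'
      have h01 : c.getD 0 (0, 0) = c.getD 1 (0, 0) := by
        refine pvPairEq x y hxy _ _ ?_ ?_
        · exact (hXc 1 (le_refl 1)).symm
        · exact hY
      refine hT (List.ext_getElem (by simp [List.length_take]; omega) ?_)
      intro i h1len h2len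
      have hi : i < 3 := by simpa using h2len
      rw [List.getElem_take, List.getElem_replicate]
      interval_cases i
      · exact (List.getD_eq_getElem c (0,0) (by omega)).symm
      · rw [← List.getD_eq_getElem c (0,0) (by omega)]; exact h01.symm
      · rw [← List.getD_eq_getElem c (0,0) (by omega)]; exact h02.symm
    · -- j ≥ 2 : B's list starts with c[1]; equality contradicts Y 1 ≠ Y j = Y 0
      have h1 : (pvBRemove c 0 j)[0]? = some (c.getD 1 (0, 0)) := by
        unfold pvBRemove
        rw [List.take_zero, List.nil_append]
        rw [List.getElem?_append_left (by rw [List.length_drop, List.length_take]; omega)]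
        rw [List.getElem?_drop, List.getElem?_take_of_lt (by omega),
            List.getElem?_eq_getElem (by omega)]
        rw [List.getD_eq_getElem c (0,0) (by omega)]
      have h01 : c.getD 0 (0, 0) = c.getD 1 (0, 0) := by
        have h' : some (c.getD 0 (0, 0)) = some (c.getD 1 (0, 0)) := by
          rw [← h0, ← h1, hlists]
        exact Option.some_inj.mp h'
      refine hNo j (le_refl j) 1 (by omega) (by omega) ?_
      have hy01 : pvX c y 1 = pvX c y 0 := by unfold pvX; rw [h01]
      exact hy01.trans hY
  · -- A finds nothing and returns (False, cnots) while B returns True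
    have hng : ∀ j' k, ¬ (1 ≤ k ∧ pvGd c x y k j') := fun j' k h =>
      hP ⟨j', k, h.2.1, h.1, h.2⟩
    rw [pvALoop_none c x y hng (c.length - 1) 1 0 PySem.Dict.empty
          (by omega) (by omega) (fun m h1 h2 => by have hm0 : m = 0 := (by omega); subst hm0; rfl)
          (Or.inl rfl) (pvDictInv_init c y)]
    simp

-- ===== VERDICT (by name: the statement is the Claim_ definition above) =====
theorem simplify_cnots_pairs_py_spec : Claim_unchanged_simplify_cnots_pairs_py := by
  intro cnots flip _hdom
  unfold Spec_simplify_cnots_pairs_py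
  intro hnD
  rw [D_simplify_cnots_pairs_py] at hnD
  by_cases hT : cnots.take 3 = List.replicate 3 (cnots.getD 0 (0, 0))
  · cases flip with
    | false =>
      simp only [simplify_cnots_pairs_py, simplify_cnots_pairs_py_alt]
      exact pvMainT cnots 1 0 hT
    | true =>
      simp only [simplify_cnots_pairs_py, simplify_cnots_pairs_py_alt]
      exact pvMainT cnots 0 1 hT
  · cases flip with
    | false =>
      simp only [simplify_cnots_pairs_py, simplify_cnots_pairs_py_alt]
      refine pvMain cnots 1 0 (fun hDA => hnD ?_)
      simp only [Bool.false_eq_true, if_false]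
      exact ⟨hDA, hT⟩
    | true =>
      simp only [simplify_cnots_pairs_py, simplify_cnots_pairs_py_alt]
      refine pvMain cnots 0 1 (fun hDA => hnD ?_)
      simp only [if_true]
      exact ⟨hDA, hT⟩

theorem simplify_cnots_pairs_py_changed : Claim_changed_simplify_cnots_pairs_py := by
  unfold Claim_changed_simplify_cnots_pairs_py; decide

theorem simplify_cnots_pairs_py_tight : Claim_exact_simplify_cnots_pairs_py := by
  intro cnots flip _hdom hD
  unfold D_simplify_cnots_pairs_py at hD
  obtain ⟨hDA, hT⟩ := hD
  cases flip with
  | false =>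
    simp only [Bool.false_eq_true, if_false] at hDA
    simp only [simplify_cnots_pairs_py, simplify_cnots_pairs_py_alt]
    exact pvTight cnots 1 0 (Or.inr ⟨rfl, rfl⟩) hDA hT
  | true =>
    simp only [if_true] at hDA
    simp only [simplify_cnots_pairs_py, simplify_cnots_pairs_py_alt]
    exact pvTight cnots 0 1 (Or.inl ⟨rfl, rfl⟩) hDA hT
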